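-- pv_equiv track=rewrite | github.com/mercerreynolds-rgb/hoops-dynasty-analytics | app/parser.py | find_pbp_start
-- ===== SOURCE A (Python) =====
-- def find_pbp_start(lines: list[str]) -> int | None:
--     for i in range(len(lines) - 3):
--         if lines[i:i+4] == ["Time", "Team", "Play", "Score"]:
--             return i + 4
--     for i, line in enumerate(lines):
--         if line == "Time Team Play Score":
--             return i + 1
--     return None
-- ===== SOURCE B (Python) =====
-- def find_pbp_start(lines):
--     header = ["Time", "Team", "Play", "Score"]
--     n = len(lines)
--     single_idx = None
--     for i, line in enumerate(lines):
--         if i + 4 <= n and lines[i:i+4] == header: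
--             return i + 4
--         if single_idx is None and line == "Time Team Play Score":
--             single_idx = i
--     return single_idx + 1 if single_idx is not None else None
-- ===== Notes on version B (the rewrite author's own statement) =====
-- stated objective: simpler
-- what changed: Replaces A's two sequential scans (a range-index window scan, then a full enumerate scan) by one single pass that returns on the first four-line header window and only remembers the first single-line header to use after the loop.
import Mathlib
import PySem

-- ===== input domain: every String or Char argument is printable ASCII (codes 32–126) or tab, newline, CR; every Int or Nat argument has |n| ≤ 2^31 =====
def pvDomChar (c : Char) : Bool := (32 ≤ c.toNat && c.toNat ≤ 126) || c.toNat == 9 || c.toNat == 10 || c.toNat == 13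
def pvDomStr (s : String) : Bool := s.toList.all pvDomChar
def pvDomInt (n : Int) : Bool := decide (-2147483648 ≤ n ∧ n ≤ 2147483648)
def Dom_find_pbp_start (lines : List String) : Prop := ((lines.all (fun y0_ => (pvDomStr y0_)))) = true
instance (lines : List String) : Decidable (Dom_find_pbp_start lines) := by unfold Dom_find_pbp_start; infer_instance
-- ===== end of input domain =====

-- B replaces A's two sequential scans by one single pass (simpler decomposition); return value proved equal on all inputs.

-- ===== PORT A =====
-- first loop: for i in range(len(lines)-3): if lines[i:i+4] == header: return i+4
def pvA_loop1 (lines : List String) : List Int → Option Int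
  | [] => none
  | i :: rest =>
      if PySem.List.slice lines (some i) (some (i + 4)) = ["Time", "Team", "Play", "Score"]
      then some (i + 4)
      else pvA_loop1 lines rest

-- second loop: for i, line in enumerate(lines): if line == "Time Team Play Score": return i+1
def pvA_loop2 : List (Int × String) → Option Int
  | [] => none
  | (i, line) :: rest =>
      if line = "Time Team Play Score" then some (i + 1) else pvA_loop2 rest

def find_pbp_start (lines : List String) : Option Int :=
  match pvA_loop1 lines (PySem.List.pyRange 0 ((lines.length : Int) - 3) 1) with
  | some v => some v
  | none => pvA_loop2 (PySem.List.enumerate lines)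

-- ===== PORT B =====
-- single pass over enumerate(lines), carrying single_idx
def pvB_loop (lines : List String) (n : Int) : List (Int × String) → Option Int → Option Int
  | [], single_idx =>
      match single_idx with
      | some s => some (s + 1)
      | none => none
  | (i, line) :: rest, single_idx =>
      if i + 4 ≤ n ∧ PySem.List.slice lines (some i) (some (i + 4)) = ["Time", "Team", "Play", "Score"]
      then some (i + 4)
      else pvB_loop lines n rest
             (if single_idx = none ∧ line = "Time Team Play Score" then some i else single_idx)

def find_pbp_start_alt (lines : List String) : Option Int :=
  pvB_loop lines (lines.length : Int) (PySem.List.enumerate lines) none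

-- ===== PRECONDITION & SPEC =====
def Spec_find_pbp_start (lines : List String) (out : Option Int) : Prop := out = find_pbp_start_alt lines
instance (lines : List String) (out : Option Int) : Decidable (Spec_find_pbp_start lines out) := by unfold Spec_find_pbp_start; infer_instance

-- ===== CLAIM (what is proved, stated in full; the proofs are below) =====
def Claim_equal_find_pbp_start : Prop := ∀ (lines : List String), Dom_find_pbp_start lines → Spec_find_pbp_start lines (find_pbp_start lines)

-- ===== LEMMAS AND PROOFS =====

-- guarded window scan over the suffix, used to relate the two ports
def pvG (lines : List String) (n : Int) : Int → List String → Option Int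
  | _, [] => none
  | k, _ :: rest =>
      if k + 4 ≤ n ∧ PySem.List.slice lines (some k) (some (k + 4)) = ["Time", "Team", "Play", "Score"]
      then some (k + 4)
      else pvG lines n (k + 1) rest

-- A's first loop over range(n-3) equals the guarded scan over a suffix of matching length
theorem pvA1_eq_G (lines : List String) (n : Int) (xs : List String) (k : Int)
    (h : k + xs.length = n) :
    pvA_loop1 lines (PySem.List.pyRange k (n - 3) 1) = pvG lines n k xs := by
  induction xs generalizing k with
  | nil =>
      simp at h
      rw [PySem.List.pyRange_one_eq_nil (by omega)]
      simp [pvA_loop1, pvG]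
  | cons x rest ih =>
      simp at h
      by_cases hk : k + 4 ≤ n
      · rw [PySem.List.pyRange_one_cons (by omega)]
        simp only [pvA_loop1, pvG, hk, true_and]
        split_ifs with hs
        · rfl
        · exact ih (k + 1) (by omega)
      · rw [PySem.List.pyRange_one_eq_nil (by omega)]
        simp only [pvA_loop1, pvG]
        rw [if_neg (by tauto)]
        have := ih (k + 1) (by omega)
        rw [PySem.List.pyRange_one_eq_nil (by omega)] at this
        simpa [pvA_loop1] using this.symm ▸ this

-- B's single pass equals: guarded window scan, else the carried single_idx, else A's second loop
theorem pvB_eq (lines : List String) (n : Int) (xs : List String) (k : Int)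
    (single : Option Int) :
    pvB_loop lines n (PySem.List.enumerate xs k) single =
      match pvG lines n k xs with
      | some v => some v
      | none =>
          match single with
          | some s => some (s + 1)
          | none => pvA_loop2 (PySem.List.enumerate xs k) := by
  induction xs generalizing k single with
  | nil => simp [PySem.List.enumerate_nil, pvB_loop, pvG, pvA_loop2]
  | cons x rest ih =>
      rw [PySem.List.enumerate_cons]
      by_cases hw : k + 4 ≤ n ∧ PySem.List.slice lines (some k) (some (k + 4)) = ["Time", "Team", "Play", "Score"]
      · simp only [pvB_loop, pvG, if_pos hw]
      · simp only [pvB_loop, pvG, if_neg hw]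
        rw [ih]
        cases hg : pvG lines n (k + 1) rest with
        | some v => rfl
        | none =>
            cases single with
            | some s => simp
            | none =>
                by_cases hx : x = "Time Team Play Score" <;> simp [hx, pvA_loop2]

theorem find_pbp_start_eq (lines : List String) :
    find_pbp_start lines = find_pbp_start_alt lines := by
  unfold find_pbp_start find_pbp_start_alt
  rw [pvA1_eq_G lines (lines.length : Int) lines 0 (by simp), pvB_eq]

-- ===== VERDICT (by name: the statement is the Claim_ definition above) =====
theorem find_pbp_start_spec : Claim_equal_find_pbp_start := by
  intro lines _
  unfold Spec_find_pbp_start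
  exact find_pbp_start_eq lines
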